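-- pv_equiv track=rewrite | github.com/tomfournier/FCCWorkspace | analysis/ZH/xsec/package/pyplots/plotting.py | _tlx_to_tex
-- ===== SOURCE A (Python) =====
-- def _tlx_to_tex(s: str) -> str:
--     '''Translate common ROOT TLatex tokens to matplotlib LaTeX.
--     Keeps it simple and fast; cover tokens used in config labels.'''
--     rep = {
--         '#rightarrow': r'\rightarrow',
--         '#leftarrow': r'\leftarrow',
--         '#mu': r'\mu',
--         '#tau': r'\tau',
--         '#gamma': r'\gamma',
--         '#nu': r'\nu',
--         '#pm': r'\pm',
--         '#pi': r'\pi',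
--         '#bf{': r'\\mathbf{',
--         '#it{': r'\\mathit{',
--         '#bar{': r'\\bar{',
--         '#minus': '-',
--         '#plus': '+',
--         '#sqrt{': r'\\sqrt{',
--         ' }': ' ',
--     }
--     out = s
--     for k, v in rep.items():
--         out = out.replace(k, v)
--     return f'${out}$' if '$' not in out else out
-- ===== SOURCE B (Python) =====
-- def _tlx_to_tex(s: str) -> str:
--     '''Translate common ROOT TLatex tokens to matplotlib LaTeX.
--     Single left-to-right table-driven scan (longest token first) instead of
--     one whole-string replace pass per token.'''
--     rep = {
--         '#rightarrow': r'\rightarrow',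
--         '#leftarrow': r'\leftarrow',
--         '#mu': r'\mu',
--         '#tau': r'\tau',
--         '#gamma': r'\gamma',
--         '#nu': r'\nu',
--         '#pm': r'\pm',
--         '#pi': r'\pi',
--         '#bf{': r'\\mathbf{',
--         '#it{': r'\\mathit{',
--         '#bar{': r'\\bar{',
--         '#minus': '-',
--         '#plus': '+',
--         '#sqrt{': r'\\sqrt{',
--         ' }': ' ',
--     }
--     keys = sorted(rep, key=len, reverse=True)
--     pieces = []
--     i = 0
--     n = len(s)
--     while i < n:
--         for k in keys:
--             if s.startswith(k, i):
--                 pieces.append(rep[k])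
--                 i += len(k)
--                 break
--         else:
--             pieces.append(s[i])
--             i += 1
--     out = ''.join(pieces)
--     return f'${out}$' if '$' not in out else out
-- ===== Notes on version B (the rewrite author's own statement) =====
-- stated objective: alternative
-- what changed: Replaces A's 15 sequential whole-string .replace() passes by a single left-to-right table-driven scan that at each position tries the token table (sorted longest-first) and emits the translation or the character, joining the pieces once.
import Mathlib
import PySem

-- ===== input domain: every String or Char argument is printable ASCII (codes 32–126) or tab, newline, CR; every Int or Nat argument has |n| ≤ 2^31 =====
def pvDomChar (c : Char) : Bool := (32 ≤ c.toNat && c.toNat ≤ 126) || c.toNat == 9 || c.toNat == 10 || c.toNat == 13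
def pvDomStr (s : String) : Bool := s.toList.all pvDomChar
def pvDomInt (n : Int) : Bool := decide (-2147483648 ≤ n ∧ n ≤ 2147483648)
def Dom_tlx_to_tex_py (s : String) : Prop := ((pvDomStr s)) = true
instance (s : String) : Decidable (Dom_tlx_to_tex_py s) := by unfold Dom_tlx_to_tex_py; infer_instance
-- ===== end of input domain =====

-- B replaces A's 15 sequential whole-string replace passes by a single left-to-right
-- table-driven scan (longest token first); equal return value proved for every string.

-- ===== PORT A =====
-- the dict literal `rep` of A (insertion order)
def repA : PySem.Dict String String := PySem.Dict.ofList
  [("#rightarrow", "\\rightarrow"), ("#leftarrow", "\\leftarrow"), ("#mu", "\\mu"),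
   ("#tau", "\\tau"), ("#gamma", "\\gamma"), ("#nu", "\\nu"), ("#pm", "\\pm"),
   ("#pi", "\\pi"), ("#bf{", "\\\\mathbf{"), ("#it{", "\\\\mathit{"),
   ("#bar{", "\\\\bar{"), ("#minus", "-"), ("#plus", "+"), ("#sqrt{", "\\\\sqrt{"),
   (" }", " ")]

def tlx_to_tex_py (s : String) : String :=
  -- out = s; for k, v in rep.items(): out = out.replace(k, v)
  let out := (PySem.Dict.items repA).foldl (fun o kv => PySem.Str.replace o kv.1 kv.2) s
  -- return f'${out}$' if '$' not in out else out
  if PySem.Str.isIn "$" out then out else "$" ++ out ++ "$"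

-- ===== PORT B =====
-- the same dict literal `rep` of Source B
def repB : PySem.Dict String String := PySem.Dict.ofList
  [("#rightarrow", "\\rightarrow"), ("#leftarrow", "\\leftarrow"), ("#mu", "\\mu"),
   ("#tau", "\\tau"), ("#gamma", "\\gamma"), ("#nu", "\\nu"), ("#pm", "\\pm"),
   ("#pi", "\\pi"), ("#bf{", "\\\\mathbf{"), ("#it{", "\\\\mathit{"),
   ("#bar{", "\\\\bar{"), ("#minus", "-"), ("#plus", "+"), ("#sqrt{", "\\\\sqrt{"),
   (" }", " ")]

-- keys = sorted(rep, key=len, reverse=True), each paired with its translation rep[k]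
def brules : List (List Char × List Char) :=
  (PySem.List.sorted (PySem.Dict.keys repB) (fun k => (PySem.Str.len k : Int)) true).map
    (fun k => (k.toList, (PySem.Dict.getD repB k "").toList))

-- cited by bscan's decreasing_by: every token in the table is nonempty
set_option maxRecDepth 100000 in
theorem brules_key_pos : ∀ r ∈ brules, 1 ≤ r.1.length := by decide

-- the while loop: at each position try the table (first = longest match), else copy the char
def bscan : List Char → List Char
  | [] => []
  | c :: t =>
    match h : brules.find? (fun r => r.1.isPrefixOf (c :: t)) with
    | some r => r.2 ++ bscan ((c :: t).drop r.1.length)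
    | none => c :: bscan t
termination_by l => l.length
decreasing_by
  · have h1 := brules_key_pos _ (List.mem_of_find?_eq_some h)
    simp only [List.length_drop, List.length_cons]; omega
  · simp

def tlx_to_tex_py_alt (s : String) : String :=
  let out := String.ofList (bscan s.toList)
  if PySem.Str.isIn "$" out then out else "$" ++ out ++ "$"

-- ===== PRECONDITION & SPEC =====
def Spec_tlx_to_tex_py (s : String) (out : String) : Prop := out = tlx_to_tex_py_alt s
instance (s : String) (out : String) : Decidable (Spec_tlx_to_tex_py s out) := by unfold Spec_tlx_to_tex_py; infer_instance

-- ===== CLAIM (what is proved, stated in full; the proofs are below) =====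
def Claim_equal_tlx_to_tex_py : Prop := ∀ (s : String), Dom_tlx_to_tex_py s → Spec_tlx_to_tex_py s (tlx_to_tex_py s)

-- ===== LEMMAS AND PROOFS =====

-- char classes: key head chars (S) and the chars that may appear as a key head or a value head (T);
-- key tails avoid T, which is what makes the 15 sequential passes independent of each other.
def inS (c : Char) : Bool := c == '#' || c == ' '
def inT (c : Char) : Bool := c == '#' || c == ' ' || c == '\\' || c == '-' || c == '+'

theorem inS_inT {c : Char} (h : inS c = true) : inT c = true := by
  simp only [inS, Bool.or_eq_true, beq_iff_eq] at h
  simp only [inT, Bool.or_eq_true, beq_iff_eq]; tauto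

-- A's rule list on List Char
def crules : List (List Char × List Char) :=
  (PySem.Dict.items repA).map (fun r => (r.1.toList, r.2.toList))

set_option maxRecDepth 100000 in
theorem crules_eq : crules = [
  (['#','r','i','g','h','t','a','r','r','o','w'], ['\\','r','i','g','h','t','a','r','r','o','w']),
  (['#','l','e','f','t','a','r','r','o','w'], ['\\','l','e','f','t','a','r','r','o','w']),
  (['#','m','u'], ['\\','m','u']),
  (['#','t','a','u'], ['\\','t','a','u']),
  (['#','g','a','m','m','a'], ['\\','g','a','m','m','a']),
  (['#','n','u'], ['\\','n','u']),
  (['#','p','m'], ['\\','p','m']),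
  (['#','p','i'], ['\\','p','i']),
  (['#','b','f','{'], ['\\','\\','m','a','t','h','b','f','{']),
  (['#','i','t','{'], ['\\','\\','m','a','t','h','i','t','{']),
  (['#','b','a','r','{'], ['\\','\\','b','a','r','{']),
  (['#','m','i','n','u','s'], ['-']),
  (['#','p','l','u','s'], ['+']),
  (['#','s','q','r','t','{'], ['\\','\\','s','q','r','t','{']),
  ([' ','}'], [' '])] := by decide

set_option maxRecDepth 100000 in
theorem brules_eq : brules = [
  (['#','r','i','g','h','t','a','r','r','o','w'], ['\\','r','i','g','h','t','a','r','r','o','w']),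
  (['#','l','e','f','t','a','r','r','o','w'], ['\\','l','e','f','t','a','r','r','o','w']),
  (['#','g','a','m','m','a'], ['\\','g','a','m','m','a']),
  (['#','m','i','n','u','s'], ['-']),
  (['#','s','q','r','t','{'], ['\\','\\','s','q','r','t','{']),
  (['#','b','a','r','{'], ['\\','\\','b','a','r','{']),
  (['#','p','l','u','s'], ['+']),
  (['#','t','a','u'], ['\\','t','a','u']),
  (['#','b','f','{'], ['\\','\\','m','a','t','h','b','f','{']),
  (['#','i','t','{'], ['\\','\\','m','a','t','h','i','t','{']),
  (['#','m','u'], ['\\','m','u']),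
  (['#','n','u'], ['\\','n','u']),
  (['#','p','m'], ['\\','p','m']),
  (['#','p','i'], ['\\','p','i']),
  ([' ','}'], [' '])] := by decide

-- rep1 old new l : structural form of Python's l.replace(old, new) for old ≠ []
def rep1 (old new : List Char) : List Char → List Char
  | [] => []
  | c :: t =>
    if old ≠ [] ∧ old.isPrefixOf (c :: t) = true then new ++ rep1 old new (t.drop (old.length - 1))
    else c :: rep1 old new t
termination_by l => l.length
decreasing_by
  · simp only [List.length_drop, List.length_cons]; omega
  · simp

theorem rep1_go (old new : List Char) (h : old ≠ []) :
    ∀ fuel (l acc : List Char), l.length ≤ fuel →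
      PySem.Chars.replace.go old new fuel l acc = acc.reverse ++ rep1 old new l := by
  intro fuel
  induction fuel with
  | zero =>
    intro l acc hl
    have : l = [] := by cases l <;> simp_all
    subst this
    show PySem.Chars.replace.go old new 0 [] acc = acc.reverse ++ rep1 old new []
    rw [rep1]
    show acc.reverse ++ [] = acc.reverse ++ []
    rfl
  | succ n ih =>
    intro l acc hl
    cases l with
    | nil =>
      rw [rep1, List.append_nil, PySem.Chars.replace.go]
      omega
    | cons c t =>
      rw [PySem.Chars.replace.go]
      by_cases hp : old.isPrefixOf (c :: t) = true
      · rw [if_pos hp]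
        obtain ⟨oh, ot⟩ := List.exists_cons_of_ne_nil h
        obtain ⟨ot', hot⟩ := ot
        have hdrop : List.drop old.length (c :: t) = t.drop (old.length - 1) := by
          subst hot; simp
        rw [hdrop, ih _ _ (by
          have := List.length_drop (l := t) (i := old.length - 1); simp at hl ⊢; omega)]
        rw [rep1, if_pos ⟨h, hp⟩]
        simp
      · rw [if_neg hp, ih _ _ (by simp at hl ⊢; omega)]
        rw [rep1, if_neg (by tauto)]
        simp

theorem replace_eq_rep1 (l old new : List Char) (h : old ≠ []) :
    PySem.Chars.replace l old new = rep1 old new l := by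
  rw [PySem.Chars.replace, if_neg (by simp [List.isEmpty_iff, h])]
  exact rep1_go old new h l.length l [] le_rfl

theorem rep1_nil (old new : List Char) : rep1 old new [] = [] := by rw [rep1]

theorem rep1_nil_old (new : List Char) : ∀ l, rep1 [] new l = l := by
  intro l
  induction l with
  | nil => rw [rep1]
  | cons c t ih => rw [rep1, if_neg (by simp)]; rw [ih]

theorem rep1_match (old new u : List Char) (h : old ≠ []) :
    rep1 old new (old ++ u) = new ++ rep1 old new u := by
  obtain ⟨c, t, rfl⟩ := List.exists_cons_of_ne_nil h
  have hpre : (c :: t).isPrefixOf (c :: (t ++ u)) = true := by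
    rw [List.isPrefixOf_iff_prefix]; exact ⟨u, by simp⟩
  rw [List.cons_append, rep1, if_pos ⟨h, hpre⟩]
  have hdrop : List.drop ((c :: t).length - 1) (t ++ u) = u := by simp
  rw [hdrop]

theorem rep1_cons (old new : List Char) (c : Char) (t : List Char)
    (h : ¬ old <+: (c :: t)) : rep1 old new (c :: t) = c :: rep1 old new t := by
  rw [rep1, if_neg (by rw [List.isPrefixOf_iff_prefix]; tauto)]

theorem rep1_skip (old new p u : List Char) (hp : ∀ d ∈ p, old.head? ≠ some d) :
    rep1 old new (p ++ u) = p ++ rep1 old new u := by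
  induction p with
  | nil => rfl
  | cons d p' ih =>
    cases old with
    | nil => rw [rep1_nil_old, rep1_nil_old]
    | cons oh ot =>
      have hne : oh ≠ d := by
        have := hp d (by simp); simp at this; exact this
      rw [List.cons_append, rep1_cons _ _ _ _ (by
        intro hpre
        exact hne (by
          have := List.cons_prefix_cons.mp hpre
          exact this.1))]
      rw [ih (fun d hd => hp d (by simp [hd]))]
      simp

-- sequential application of a rule list (A's loop, in rep1 form)
def seqC (R : List (List Char × List Char)) (l : List Char) : List Char :=
  R.foldl (fun o r => rep1 r.1 r.2 o) l

theorem seqC_nil (R : List (List Char × List Char)) : seqC R [] = [] := by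
  induction R with
  | nil => rfl
  | cons r R ih => simp only [seqC, List.foldl_cons] at ih ⊢; rw [rep1_nil]; exact ih

theorem seqC_cons (R : List (List Char × List Char)) (r : List Char × List Char) (l : List Char) :
    seqC (r :: R) l = seqC R (rep1 r.1 r.2 l) := rfl

theorem seqC_append (R1 R2 : List (List Char × List Char)) (l : List Char) :
    seqC (R1 ++ R2) l = seqC R2 (seqC R1 l) := List.foldl_append

theorem seqC_skip (R : List (List Char × List Char)) (p u : List Char)
    (hp : ∀ r ∈ R, ∀ d ∈ p, r.1.head? ≠ some d) :
    seqC R (p ++ u) = p ++ seqC R u := by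
  induction R generalizing u with
  | nil => rfl
  | cons r R ih =>
    rw [seqC_cons, seqC_cons, rep1_skip _ _ _ _ (hp r (by simp)),
      ih _ (fun r' hr' => hp r' (List.mem_cons_of_mem _ hr'))]

-- "x is empty or starts with a T-char" (heads of partially rewritten suffixes)
def HeadT (x : List Char) : Prop := x = [] ∨ ∃ c r, x = c :: r ∧ inT c = true

-- a key cannot match at the start of (c :: p) ++ x when it does not match inside c :: p
-- (key tails avoid T, and x starts with a T-char if nonempty)
theorem no_match_block (k : List Char) (c : Char) (p x : List Char)
    (hk : k ≠ []) (htail : ∀ d ∈ k.tail, inT d = false)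
    (hx : HeadT x) (hnm : ¬ k <+: (c :: p)) :
    ¬ k <+: ((c :: p) ++ x) := by
  intro hpre
  by_cases hlen : k.length ≤ (c :: p).length
  · exact hnm (by
      have h1 : k = ((c :: p) ++ x).take k.length := by
        obtain ⟨w, hw⟩ := hpre
        rw [← hw]; simp
      rw [List.take_append_of_le_length hlen] at h1
      exact h1 ▸ List.take_prefix _ _)
  · have hlen2 : (c :: p).length < k.length := Nat.lt_of_not_le hlen
    rcases hx with rfl | ⟨cx, xr, rfl, hcx⟩
    · simp only [List.append_nil] at hpre
      exact absurd hpre.length_le (by omega)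
    · -- k's char at index (c::p).length is cx, lies in k.tail, so inT cx = false; contradiction
      have hidx : (c :: p).length < k.length := hlen2
      have hget : k[(c :: p).length]'hidx = cx := by
        rw [List.IsPrefix.getElem hpre hidx]
        rw [List.getElem_append_right (by simp)]
        simp
      have hmem : cx ∈ k.tail := by
        obtain ⟨kh, kt, rfl⟩ := List.exists_cons_of_ne_nil hk
        rw [← hget]
        simp only [List.length_cons] at hidx ⊢
        rw [List.getElem_cons_succ]
        exact List.getElem_mem _
      rw [htail cx hmem] at hcx; exact absurd hcx (by simp)

-- rule table well-formedness, checked by `decide` on the literal table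
def ruleOk (r : List Char × List Char) : Bool :=
  !r.1.isEmpty && inS (r.1.headD 'a') && r.1.tail.all (fun d => !(inT d)) &&
  !r.2.isEmpty && inT (r.2.headD 'a')

theorem crules_ok : ∀ r ∈ crules, ruleOk r = true := by rw [crules_eq]; decide

theorem ruleOk_key_ne {r : List Char × List Char} (h : ruleOk r = true) : r.1 ≠ [] := by
  simp only [ruleOk, Bool.and_eq_true, Bool.not_eq_true', List.isEmpty_eq_false_iff] at h
  exact h.1.1.1.1

theorem ruleOk_key_head {r : List Char × List Char} (h : ruleOk r = true) :
    ∃ kh kt, r.1 = kh :: kt ∧ inS kh = true := by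
  obtain ⟨kh, kt, hk⟩ := List.exists_cons_of_ne_nil (ruleOk_key_ne h)
  refine ⟨kh, kt, hk, ?_⟩
  simp only [ruleOk, Bool.and_eq_true] at h
  have := h.1.1.1.2; rwa [hk] at this

theorem ruleOk_key_tail {r : List Char × List Char} (h : ruleOk r = true) :
    ∀ d ∈ r.1.tail, inT d = false := by
  intro d hd
  simp only [ruleOk, Bool.and_eq_true, List.all_eq_true] at h
  have := h.1.1.2 d hd; simpa using this

theorem ruleOk_val_head {r : List Char × List Char} (h : ruleOk r = true) :
    ∃ vh vt, r.2 = vh :: vt ∧ inT vh = true := by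
  simp only [ruleOk, Bool.and_eq_true, Bool.not_eq_true', List.isEmpty_eq_false_iff] at h
  obtain ⟨vh, vt, hv⟩ := List.exists_cons_of_ne_nil h.1.2
  exact ⟨vh, vt, hv, by have := h.2; rwa [hv] at this⟩

theorem head_ne_of_inS_false {r : List Char × List Char} (hr : ruleOk r = true)
    {d : Char} (hd : inS d = false) : r.1.head? ≠ some d := by
  obtain ⟨kh, kt, hk, hkh⟩ := ruleOk_key_head hr
  rw [hk]
  simp only [List.head?_cons, ne_eq, Option.some.injEq]
  intro h
  rw [h, hd] at hkh
  cases hkh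

theorem head_ne_of_inT_false {r : List Char × List Char} (hr : ruleOk r = true)
    {d : Char} (hd : inT d = false) : r.1.head? ≠ some d := by
  obtain ⟨kh, kt, hk, hkh⟩ := ruleOk_key_head hr
  rw [hk]
  simp only [List.head?_cons, ne_eq, Option.some.injEq]
  intro h
  have h2 := inS_inT hkh
  rw [h, hd] at h2
  cases h2

theorem headT_rep1 (r : List Char × List Char) (hr : ruleOk r = true) (x : List Char)
    (hx : HeadT x) : HeadT (rep1 r.1 r.2 x) := by
  rcases hx with rfl | ⟨cx, xr, rfl, hcx⟩
  · left; exact rep1_nil _ _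
  · obtain ⟨vh, vt, hv, hvh⟩ := ruleOk_val_head hr
    rw [rep1]
    split
    · right; exact ⟨vh, vt ++ rep1 r.1 r.2 (xr.drop (r.1.length - 1)), by rw [hv]; simp, hvh⟩
    · right; exact ⟨cx, rep1 r.1 r.2 xr, rfl, hcx⟩

-- the no-match step: a visible prefix c :: p (p avoids S) with a T-headed tail passes through all rules
theorem seqC_block (R : List (List Char × List Char)) (hR : ∀ r ∈ R, ruleOk r = true)
    (c : Char) (p : List Char) :
    ∀ x, HeadT x → (∀ r ∈ R, ¬ r.1 <+: (c :: p)) → (∀ d ∈ p, inS d = false) →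
      seqC R ((c :: p) ++ x) = (c :: p) ++ seqC R x := by
  induction R with
  | nil => intro x _ _ _; rfl
  | cons r R ih =>
    intro x hx hnm hp
    have hr := hR r (by simp)
    have hstep : rep1 r.1 r.2 ((c :: p) ++ x) = (c :: p) ++ rep1 r.1 r.2 x := by
      have hblock := no_match_block r.1 c p x (ruleOk_key_ne hr) (ruleOk_key_tail hr) hx
        (hnm r (by simp))
      rw [List.cons_append, rep1_cons _ _ _ _ (by simpa using hblock)]
      rw [rep1_skip _ _ _ _ (fun d hd => head_ne_of_inS_false hr (hp d hd))]
      simp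
    rw [seqC_cons, hstep, seqC_cons]
    exact ih (fun r' hr' => hR r' (List.mem_cons_of_mem _ hr')) _
      (headT_rep1 r hr x hx) (fun r' hr' => hnm r' (List.mem_cons_of_mem _ hr')) hp

-- rules whose keys are prefix-incomparable with k pass over a leading k unchanged
theorem seqC_skip_key (R : List (List Char × List Char)) (k : List Char) (hk : k ≠ [])
    (hktail : ∀ d ∈ k.tail, inT d = false)
    (hR : ∀ r ∈ R, ruleOk r = true ∧ ¬ r.1 <+: k ∧ ¬ k <+: r.1) :
    ∀ u, seqC R (k ++ u) = k ++ seqC R u := by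
  induction R with
  | nil => intro u; rfl
  | cons r R ih =>
    intro u
    obtain ⟨hr, hnp1, hnp2⟩ := hR r (by simp)
    have hnm : ¬ r.1 <+: (k ++ u) := by
      intro hpre
      rcases List.prefix_or_prefix_of_prefix hpre (List.prefix_append k u) with h | h
      · exact hnp1 h
      · exact hnp2 h
    obtain ⟨c, t, rfl⟩ := List.exists_cons_of_ne_nil hk
    have hstep : rep1 r.1 r.2 ((c :: t) ++ u) = (c :: t) ++ rep1 r.1 r.2 u := by
      rw [List.cons_append, rep1_cons _ _ _ _ (by simpa using hnm)]
      rw [rep1_skip _ _ _ _ (fun d hd =>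
        head_ne_of_inT_false hr (hktail d (by simpa using hd)))]
      simp
    rw [seqC_cons, hstep, seqC_cons]
    exact ih (fun r' hr' => hR r' (List.mem_cons_of_mem _ hr')) _

-- ===== connecting A's rule order with the scan =====

-- pairwise facts about A's table (checked on the literal table)
theorem crules_pairwise :
    List.Pairwise (fun a b : List Char × List Char =>
      (¬ a.1 <+: b.1 ∧ ¬ b.1 <+: a.1) ∧
        a.2.all (fun d => b.1.head? != some d) = true) crules := by
  rw [crules_eq]; decide

theorem brules_sub_crules : ∀ r ∈ brules, r ∈ crules := by
  rw [brules_eq, crules_eq]; decide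
theorem crules_sub_brules : ∀ r ∈ crules, r ∈ brules := by
  rw [brules_eq, crules_eq]; decide

-- the matched-token step: if k matches at the front, A's whole pass chain rewrites it to v
theorem seqC_match (pre post : List (List Char × List Char)) (k v : List Char)
    (hall : ∀ r ∈ pre ++ (k, v) :: post, ruleOk r = true)
    (hpw : List.Pairwise (fun a b : List Char × List Char =>
      (¬ a.1 <+: b.1 ∧ ¬ b.1 <+: a.1) ∧
        a.2.all (fun d => b.1.head? != some d) = true) (pre ++ (k, v) :: post))
    (u : List Char) :
    seqC (pre ++ (k, v) :: post) (k ++ u) = v ++ seqC (pre ++ (k, v) :: post) u := by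
  have hk := hall (k, v) (by simp)
  have hkne : k ≠ [] := ruleOk_key_ne hk
  have hktail : ∀ d ∈ k.tail, inT d = false := ruleOk_key_tail hk
  rw [List.pairwise_append] at hpw
  obtain ⟨hpw1, hpw2, hpw3⟩ := hpw
  have hpre : ∀ r ∈ pre, ruleOk r = true ∧ ¬ r.1 <+: k ∧ ¬ k <+: r.1 := by
    intro r hr
    exact ⟨hall r (by simp [hr]), (hpw3 r hr (k, v) (by simp)).1.1, (hpw3 r hr (k, v) (by simp)).1.2⟩
  have hpost : ∀ r ∈ post, ∀ d ∈ v, r.1.head? ≠ some d := by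
    intro r hr
    rw [List.pairwise_cons] at hpw2
    have := (hpw2.1 r hr).2
    simp only [List.all_eq_true, bne_iff_ne, ne_eq] at this
    exact fun d hd => this d hd
  have step1 := seqC_skip_key pre k hkne hktail hpre
  calc seqC (pre ++ (k, v) :: post) (k ++ u)
      = seqC post (rep1 k v (seqC pre (k ++ u))) := by
        rw [seqC_append]; rfl
    _ = seqC post (rep1 k v (k ++ seqC pre u)) := by rw [step1]
    _ = seqC post (v ++ rep1 k v (seqC pre u)) := by rw [rep1_match k v _ hkne]
    _ = v ++ seqC post (rep1 k v (seqC pre u)) := seqC_skip post v _ (by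
        intro r hr; exact hpost r hr)
    _ = v ++ seqC (pre ++ (k, v) :: post) u := by rw [seqC_append]; rfl

-- main equivalence: the 15 sequential passes equal the single scan
theorem seqC_eq_bscan : ∀ l, seqC crules l = bscan l := by
  intro l
  induction l using bscan.induct with
  | case1 => rw [bscan]; exact seqC_nil crules
  | case2 c t r hfind ih =>
    have hmem := brules_sub_crules r (List.mem_of_find?_eq_some hfind)
    have hps := List.find?_some hfind
    have hpre : r.1 <+: (c :: t) := List.isPrefixOf_iff_prefix.mp hps
    obtain ⟨u, hu⟩ := hpre
    obtain ⟨pre, post, hsplit⟩ := List.append_of_mem hmem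
    have hdrop : (c :: t).drop r.1.length = u := by rw [← hu, List.drop_left]
    have h2 : pre ++ (r.1, r.2) :: post = crules := by rw [hsplit]
    have hmatch : seqC crules (r.1 ++ u) = r.2 ++ seqC crules u := by
      rw [← h2]
      exact seqC_match pre post r.1 r.2 (h2 ▸ crules_ok) (h2 ▸ crules_pairwise) u
    rw [hdrop] at ih
    calc seqC crules (c :: t) = r.2 ++ seqC crules u := by rw [← hu]; exact hmatch
      _ = r.2 ++ bscan u := by rw [ih]
      _ = bscan (c :: t) := by
          rw [bscan, hfind]
          show r.2 ++ bscan u = r.2 ++ bscan (List.drop r.1.length (c :: t))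
          rw [hdrop]
  | case3 c t hfind ih =>
    have hnone : ∀ r ∈ crules, ¬ r.1 <+: (c :: t) := by
      intro r hr hpre
      have := List.find?_eq_none.mp hfind r (crules_sub_brules r hr)
      exact this (List.isPrefixOf_iff_prefix.mpr hpre)
    set p := t.takeWhile (fun d => !(inS d)) with hp_def
    set x := t.dropWhile (fun d => !(inS d)) with hx_def
    have htx : p ++ x = t := List.takeWhile_append_dropWhile
    have hp : ∀ d ∈ p, inS d = false := by
      intro d hd
      have := List.mem_takeWhile_imp hd
      simpa using this
    have hx : HeadT x := by
      cases hx' : x with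
      | nil => left; rfl
      | cons cx xr =>
        right
        refine ⟨cx, xr, rfl, ?_⟩
        have := List.head?_dropWhile_not (p := fun d => !(inS d)) (l := t)
        rw [← hx_def, hx'] at this
        simp at this
        exact inS_inT this
    have hnm : ∀ r ∈ crules, ¬ r.1 <+: (c :: p) := by
      intro r hr hpre
      exact hnone r hr (hpre.trans (by
        rw [List.prefix_cons_inj]
        exact (htx ▸ List.prefix_append p x)))
    have hmain := seqC_block crules crules_ok c p x hx hnm hp
    have hskip : seqC crules (p ++ x) = p ++ seqC crules x := by
      apply seqC_skip
      intro r hr d hd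
      exact head_ne_of_inS_false (crules_ok r hr) (hp d hd)
    calc seqC crules (c :: t) = seqC crules ((c :: p) ++ x) := by rw [List.cons_append, htx]
      _ = (c :: p) ++ seqC crules x := hmain
      _ = c :: (p ++ seqC crules x) := by simp
      _ = c :: seqC crules (p ++ x) := by rw [hskip]
      _ = c :: seqC crules t := by rw [htx]
      _ = c :: bscan t := by rw [ih]
      _ = bscan (c :: t) := by
          rw [bscan, hfind]

-- A's String-level fold equals the seqC form on toList
theorem foldl_replace_toList (L : List (String × String)) (hL : ∀ r ∈ L, r.1 ≠ "") :
    ∀ s : String, (L.foldl (fun o r => PySem.Str.replace o r.1 r.2) s).toList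
      = seqC (L.map (fun r => (r.1.toList, r.2.toList))) s.toList := by
  induction L with
  | nil => intro s; rfl
  | cons r L ih =>
    intro s
    rw [List.foldl_cons, ih (fun r' hr' => hL r' (by simp [hr'])), List.map_cons, seqC_cons]
    congr 1
    rw [PySem.Str.toList_replace, replace_eq_rep1 _ _ _ (by
      intro h
      exact hL r (by simp) (by
        have : r.1.toList = "".toList := by simpa using h
        exact String.toList_inj.mp this))]

set_option maxRecDepth 100000 in
theorem repA_keys_ne : ∀ r ∈ PySem.Dict.items repA, r.1 ≠ "" := by decide

-- ===== VERDICT (by name: the statement is the Claim_ definition above) =====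
theorem tlx_to_tex_py_spec : Claim_equal_tlx_to_tex_py := by
  intro s _
  unfold Spec_tlx_to_tex_py tlx_to_tex_py tlx_to_tex_py_alt
  have hout : ((PySem.Dict.items repA).foldl (fun o kv => PySem.Str.replace o kv.1 kv.2) s)
      = String.ofList (bscan s.toList) := by
    apply String.toList_inj.mp
    rw [foldl_replace_toList _ repA_keys_ne s, show
      ((PySem.Dict.items repA).map (fun r => (r.1.toList, r.2.toList))) = crules from rfl,
      seqC_eq_bscan]
    rw [String.toList_ofList]
  rw [hout]
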